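-- pv_equiv track=rewrite | github.com/DagiWarBoss/ai-tutor | backend/populate_topics_with_text.py | build_children_by_parent
-- ===== SOURCE A (Python) =====
-- from typing import List, Tuple, Dict, Optional, Set
--
-- def build_children_by_parent(csv_list: List[Tuple[str, Optional[str]]]) -> Dict[str, List[Tuple[str, Optional[str]]]]:
--     by_parent: Dict[str, List[Tuple[str, Optional[str]]]] = {}
--     for n, t in csv_list:
--         parts = n.split(".")
--         if len(parts) >= 2:
--             parent = ".".join(parts[:-1]).strip(".")
--             if parent:
--                 by_parent.setdefault(parent, []).append((n, t))
--     for k in by_parent: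
--         by_parent[k].sort(key=lambda t: [int(x) for x in t[0].split(".") if x.isdigit()])
--     return by_parent
-- ===== SOURCE B (Python) =====
-- from typing import List, Tuple, Dict, Optional
--
--
-- def _parent_of(name: str) -> Optional[str]:
--     parts = name.split(".")
--     if len(parts) < 2:
--         return None
--     parent = ".".join(parts[:-1]).strip(".")
--     return parent if parent else None
--
--
-- def _num_key(item: Tuple[str, Optional[str]]) -> List[int]:
--     return [int(x) for x in item[0].split(".") if x.isdigit()]
--
--
-- def build_children_by_parent(csv_list: List[Tuple[str, Optional[str]]]) -> Dict[str, List[Tuple[str, Optional[str]]]]: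
--     parents = dict.fromkeys(p for p in (_parent_of(n) for n, _ in csv_list) if p is not None)
--     return {p: sorted((item for item in csv_list if _parent_of(item[0]) == p), key=_num_key)
--             for p in parents}
-- ===== Notes on version B (the rewrite author's own statement) =====
-- stated objective: alternative
-- what changed: Replaces A's one-pass dict accumulation (setdefault/append, then a second loop sorting each bucket in place) by a two-phase decomposition: dedup the parent keys in first-appearance order, then build each group directly as a sorted filter of the input list per parent.
import Mathlib
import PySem

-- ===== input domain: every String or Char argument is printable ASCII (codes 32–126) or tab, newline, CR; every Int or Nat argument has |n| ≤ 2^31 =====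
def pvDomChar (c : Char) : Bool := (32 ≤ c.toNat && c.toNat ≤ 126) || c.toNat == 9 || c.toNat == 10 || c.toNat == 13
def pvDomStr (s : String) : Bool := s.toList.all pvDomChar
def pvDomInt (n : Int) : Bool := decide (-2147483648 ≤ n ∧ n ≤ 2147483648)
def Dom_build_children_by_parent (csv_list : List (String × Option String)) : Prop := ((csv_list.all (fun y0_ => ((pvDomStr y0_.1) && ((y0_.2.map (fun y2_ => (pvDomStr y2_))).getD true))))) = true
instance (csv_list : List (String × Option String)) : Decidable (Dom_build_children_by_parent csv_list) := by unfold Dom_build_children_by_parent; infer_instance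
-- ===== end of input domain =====

-- B replaces A's one-pass dict accumulation (setdefault/append, then per-bucket in-place
-- sort) by a two-phase decomposition: dedup the parent keys in first-appearance order,
-- then build each group directly as a sorted filter of the list (objective: alternative).

-- ===== PORT A =====
-- the numeric sort key  [int(x) for x in t[0].split(".") if x.isdigit()]
-- (int(x) is guarded by x.isdigit(), so ofStr? is always `some` there; getD 0 is exact)
def pvNumKey (t : String × Option String) : List Int :=
  (((PySem.Str.split? t.1 ".").getD []).filter PySem.Str.strIsdigit).map
    (fun x => (PySem.Int.ofStr? x).getD 0)

def build_children_by_parent (csv_list : List (String × Option String)) : List (String × List (String × Option String)) :=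
  (csv_list.foldl (fun d nt =>
      let parts := (PySem.Str.split? nt.1 ".").getD []
      if parts.length ≥ 2 then
        let parent := PySem.Str.stripChars (PySem.Str.join "." (PySem.List.slice parts none (some (-1)))) "."
        if parent ≠ "" then d.modify parent [] (· ++ [nt]) else d
      else d) PySem.Dict.empty).items.map
    -- for k in by_parent: by_parent[k].sort(key=…)  — sort each stored list in place
    (fun kv => (kv.1, PySem.List.sorted kv.2 pvNumKey false))

-- ===== PORT B =====
def pvParentOf (name : String) : Option String :=
  let parts := (PySem.Str.split? name ".").getD []
  if parts.length < 2 then none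
  else
    let parent := PySem.Str.stripChars (PySem.Str.join "." (PySem.List.slice parts none (some (-1)))) "."
    if parent = "" then none else some parent

def build_children_by_parent_alt (csv_list : List (String × Option String)) : List (String × List (String × Option String)) :=
  (PySem.List.dedup (csv_list.filterMap (fun it => pvParentOf it.1))).map (fun p =>
    (p, PySem.List.sorted (csv_list.filter (fun it => pvParentOf it.1 == some p)) pvNumKey false))

-- ===== PRECONDITION & SPEC =====
def Spec_build_children_by_parent (csv_list : List (String × Option String)) (out : List (String × List (String × Option String))) : Prop := out = build_children_by_parent_alt csv_list
instance (csv_list : List (String × Option String)) (out : List (String × List (String × Option String))) : Decidable (Spec_build_children_by_parent csv_list out) := by unfold Spec_build_children_by_parent; infer_instance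

-- ===== CLAIM (what is proved, stated in full; the proofs are below) =====
def Claim_equal_build_children_by_parent : Prop := ∀ (csv_list : List (String × Option String)), Dom_build_children_by_parent csv_list → Spec_build_children_by_parent csv_list (build_children_by_parent csv_list)

-- ===== LEMMAS AND PROOFS =====

-- A's loop body is exactly a match on pvParentOf
theorem pv_step_eq (d : PySem.Dict String (List (String × Option String))) (nt : String × Option String) :
    (let parts := (PySem.Str.split? nt.1 ".").getD []
     if parts.length ≥ 2 then
       let parent := PySem.Str.stripChars (PySem.Str.join "." (PySem.List.slice parts none (some (-1)))) "."
       if parent ≠ "" then d.modify parent [] (· ++ [nt]) else d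
     else d)
    = match pvParentOf nt.1 with
      | some p => d.modify p [] (· ++ [nt])
      | none => d := by
  simp only [pvParentOf]
  split_ifs with h1 h2 h3 <;> simp_all
  omega

-- the decorated list of (parent, item) pairs
def pvPairs (csv_list : List (String × Option String)) : List (String × (String × Option String)) :=
  csv_list.filterMap (fun it => (pvParentOf it.1).map (fun p => (p, it)))

theorem pv_fold_eq (csv_list : List (String × Option String)) (d : PySem.Dict String (List (String × Option String))) :
    csv_list.foldl (fun d nt =>
      let parts := (PySem.Str.split? nt.1 ".").getD []
      if parts.length ≥ 2 then
        let parent := PySem.Str.stripChars (PySem.Str.join "." (PySem.List.slice parts none (some (-1)))) "."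
        if parent ≠ "" then d.modify parent [] (· ++ [nt]) else d
      else d) d
    = (pvPairs csv_list).foldl (fun d q => d.modify q.1 [] (· ++ [q.2])) d := by
  induction csv_list generalizing d with
  | nil => rfl
  | cons nt rest ih =>
      simp only [List.foldl_cons, pvPairs, List.filterMap_cons]
      rw [pv_step_eq]
      cases h : pvParentOf nt.1 with
      | none => simpa [pvPairs] using ih _
      | some p => simpa [pvPairs] using ih _

theorem pv_fst_pairs (csv_list : List (String × Option String)) :
    (pvPairs csv_list).map (·.1) = csv_list.filterMap (fun it => pvParentOf it.1) := by
  simp [pvPairs, List.map_filterMap, Function.comp_def]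

theorem pv_bucket (csv_list : List (String × Option String)) (p : String) :
    ((pvPairs csv_list).filter (fun q => q.1 == p)).map (·.2)
      = csv_list.filter (fun it => pvParentOf it.1 == some p) := by
  induction csv_list with
  | nil => rfl
  | cons it rest ih =>
      simp only [pvPairs, List.filterMap_cons]
      cases h : pvParentOf it.1 with
      | none => simp [h, ← ih, pvPairs]
      | some p' =>
          by_cases hp : p' = p <;> simp [h, hp, ← ih, pvPairs]

-- a dict with Nodup keys is the map of getD over its keys
theorem pv_items_eq_map_keys {ν : Type} (d : PySem.Dict String ν) (dflt : ν) (h : d.keys.Nodup) :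
    d.items = d.keys.map (fun k => (k, d.getD k dflt)) := by
  simp only [PySem.Dict.keys] at *
  rw [List.map_map]
  conv_lhs => rw [← List.map_id d.items]
  apply List.map_congr_left
  intro p hp
  have := PySem.Dict.getD_of_mem_items d (k := p.1) (v := p.2) (by simpa using hp) (by simpa [PySem.Dict.keys] using h) dflt
  simp [Function.comp, this]

-- ===== VERDICT (by name: the statement is the Claim_ definition above) =====
theorem build_children_by_parent_spec : Claim_equal_build_children_by_parent := by
  intro csv_list _
  unfold Spec_build_children_by_parent build_children_by_parent build_children_by_parent_alt
  rw [pv_fold_eq]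
  set F := fun (d : PySem.Dict String (List (String × Option String))) (q : String × (String × Option String)) => d.modify q.1 [] (· ++ [q.2]) with hF
  have hnodup : ((pvPairs csv_list).foldl F PySem.Dict.empty).keys.Nodup := by
    exact PySem.Dict.nodup_keys_foldl_modify_key (pvPairs csv_list) (·.1) [] (fun d q => (· ++ [q.2])) _ (by simp)
  rw [pv_items_eq_map_keys _ [] hnodup]
  have hkeys : ((pvPairs csv_list).foldl F PySem.Dict.empty).keys
      = PySem.List.dedup (csv_list.filterMap (fun it => pvParentOf it.1)) := by
    rw [show ((pvPairs csv_list).foldl F PySem.Dict.empty).keys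
        = PySem.Set.update PySem.Dict.empty.keys ((pvPairs csv_list).map (·.1)) from
      PySem.Dict.keys_foldl_modify_key (pvPairs csv_list) (·.1) [] (fun d q => (· ++ [q.2])) _]
    rw [pv_fst_pairs]
    simp [PySem.Dict.keys_empty, PySem.Set.update, PySem.List.dedup_eq_ofList, PySem.Set.ofList]
  rw [hkeys, List.map_map]
  apply List.map_congr_left
  intro p _
  have hg : ((pvPairs csv_list).foldl F PySem.Dict.empty).getD p []
      = csv_list.filter (fun it => pvParentOf it.1 == some p) := by
    rw [show ((pvPairs csv_list).foldl F PySem.Dict.empty).getD p []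
        = PySem.Dict.empty.getD p [] ++ ((pvPairs csv_list).filter (fun q => q.1 == p)).map (·.2) from
      PySem.Dict.getD_foldl_modify_append ..]
    rw [pv_bucket]
    simp [PySem.Dict.getD_empty]
  simp [Function.comp, hg]
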